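-- pv_equiv track=rewrite | github.com/Ogbunugafor-Philip/-Speak-to-Infrastructure-AI-Powered-Natural-Language-to-Terraform-Generator- | src/context_followup_prompts.py | validate_region
-- ===== SOURCE A (Python) =====
-- def validate_region(region, valid_regions):
--     """Validate region input."""
--     region_lower = region.lower().strip()
--
--     # Check exact match
--     if region_lower in [r.lower() for r in valid_regions]:
--         return True, region_lower
--
--     # Check partial match
--     for valid_region in valid_regions:
--         if region_lower in valid_region.lower():
--             return True, valid_region
--
--     return False, None
-- ===== SOURCE B (Python) =====
-- def validate_region(region, valid_regions):
--     """Single pass: exact match returns immediately; first partial match is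
--     remembered and used only if no exact match exists anywhere."""
--     region_lower = region.lower().strip()
--     partial = None
--     for r in valid_regions:
--         rl = r.lower()
--         if rl == region_lower:
--             return True, region_lower
--         if partial is None and region_lower in rl:
--             partial = r
--     if partial is not None:
--         return True, partial
--     return False, None
-- ===== Notes on version B (the rewrite author's own statement) =====
-- stated objective: alternative
-- what changed: Replaces A's two passes (build a lowered copy of the whole list for the exact-match membership test, then a second partial-match scan) with one single scan that returns on an exact match and remembers the first partial match in an accumulator, used only after the whole list is scanned.
import Mathlib
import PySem

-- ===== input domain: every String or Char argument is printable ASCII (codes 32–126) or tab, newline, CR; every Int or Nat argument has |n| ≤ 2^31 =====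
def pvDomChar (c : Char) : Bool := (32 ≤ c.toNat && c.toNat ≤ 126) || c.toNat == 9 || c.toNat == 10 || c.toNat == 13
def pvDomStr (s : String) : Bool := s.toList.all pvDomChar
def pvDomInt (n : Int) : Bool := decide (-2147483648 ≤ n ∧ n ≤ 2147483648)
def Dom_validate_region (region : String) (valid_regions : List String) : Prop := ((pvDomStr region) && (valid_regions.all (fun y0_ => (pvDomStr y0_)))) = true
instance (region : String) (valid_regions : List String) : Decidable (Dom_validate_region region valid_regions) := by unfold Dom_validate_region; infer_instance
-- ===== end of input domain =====

-- B merges A's two scans into one pass that remembers the first partial match (objective: alternative decomposition).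
-- ===== PORT A =====
def validate_region (region : String) (valid_regions : List String) : Bool × Option String :=
  let region_lower := PySem.Str.strip (PySem.Str.lower region)
  if (valid_regions.map (fun r => PySem.Str.lower r)).contains region_lower then
    (true, some region_lower)
  else
    match valid_regions.find? (fun r => PySem.Str.isIn region_lower (PySem.Str.lower r)) with
    | some valid_region => (true, some valid_region)
    | none => (false, none)

-- ===== PORT B =====
-- the single for-loop of Source B, carrying the 'partial' accumulator
def vrAltLoop (region_lower : String) (partial? : Option String) : List String → Bool × Option String
  | [] => match partial? with
          | some p => (true, some p)
          | none => (false, none)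
  | r :: rest =>
    let rl := PySem.Str.lower r
    if rl == region_lower then (true, some region_lower)
    else if partial?.isNone && PySem.Str.isIn region_lower rl then
      vrAltLoop region_lower (some r) rest
    else vrAltLoop region_lower partial? rest

def validate_region_alt (region : String) (valid_regions : List String) : Bool × Option String :=
  vrAltLoop (PySem.Str.strip (PySem.Str.lower region)) none valid_regions

-- ===== PRECONDITION & SPEC =====
def Spec_validate_region (region : String) (valid_regions : List String) (out : Bool × Option String) : Prop := out = validate_region_alt region valid_regions
instance (region : String) (valid_regions : List String) (out : Bool × Option String) : Decidable (Spec_validate_region region valid_regions out) := by unfold Spec_validate_region; infer_instance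

-- ===== CLAIM (what is proved, stated in full; the proofs are below) =====
def Claim_equal_validate_region : Prop := ∀ (region : String) (valid_regions : List String), Dom_validate_region region valid_regions → Spec_validate_region region valid_regions (validate_region region valid_regions)

-- ===== LEMMAS AND PROOFS =====

-- ===== VERDICT (by name: the statement is the Claim_ definition above) =====
-- characterisation of B's loop for any accumulator state
theorem vrAltLoop_eq (rl : String) (p : Option String) (l : List String) :
    vrAltLoop rl p l =
      if (l.map (fun r => PySem.Str.lower r)).contains rl then (true, some rl)
      else match p with
        | some q => (true, some q)
        | none =>
          match l.find? (fun r => PySem.Str.isIn rl (PySem.Str.lower r)) with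
          | some r => (true, some r)
          | none => (false, none) := by
  induction l generalizing p with
  | nil => cases p <;> simp [vrAltLoop]
  | cons r rest ih =>
    by_cases hex : PySem.Str.lower r = rl
    · have hin : PySem.Str.isIn rl (PySem.Str.lower r) = true := by
        rw [hex, PySem.Str.isIn_iff_infix]
      simp [vrAltLoop, hex]
    · have hne : (PySem.Str.lower r == rl) = false := by simp [hex]
      have hex' : ¬ rl = PySem.Str.lower r := fun h => hex h.symm
      by_cases hsub : PySem.Str.isIn rl (PySem.Str.lower r) = true
      · have hsub2 : PySem.Chars.isIn rl.toList (PySem.Chars.lower r.toList) = true := by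
          simpa using hsub
        cases p with
        | none =>
          simp only [vrAltLoop, hne, Option.isNone_none, hsub, Bool.true_and, ih]
          simp [List.find?, hsub2, hex']
        | some q =>
          simp only [vrAltLoop, hne, Option.isNone_some, Bool.false_and, ih]
          simp [hex']
      · have hsub2 : PySem.Chars.isIn rl.toList (PySem.Chars.lower r.toList) = false := by
          simpa using eq_false_of_ne_true hsub
        cases p <;>
        · simp only [vrAltLoop, hne, Bool.and_eq_true, ih]
          simp [List.find?, hsub2, hex']

theorem validate_region_spec : Claim_equal_validate_region := by
  intro region valid_regions _
  unfold Spec_validate_region validate_region validate_region_alt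
  rw [vrAltLoop_eq]
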